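-- pv_equiv track=rewrite | github.com/joshanashakya/dissertation | workspace/dataset/java-python/GeeksForGeeks/5142/A/2.py | slopeOfNum
-- ===== SOURCE A (Python) =====
-- def slopeOfNum(num, n):
--
--     # to store slope of the given
--     # number 'num'
--     slope = 0
--
--     # loop from the 2nd digit up
--     # to the 2nd last digit
--     # of the given number 'num'
--     for i in range(1, n - 1) :
--
--         # if the digit is a maxima
--         if (num[i] > num[i - 1] and
--             num[i] > num[i + 1]):
--             slope += 1
--
--         # if the digit is a minima
--         elif (num[i] < num[i - 1] and
--               num[i] < num[i + 1]):
--             slope += 1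
--
--     # required slope
--     return slope
-- ===== SOURCE B (Python) =====
-- def slopeOfNum(num, n):
--     # direction sequence over consecutive pairs of the first n digits,
--     # then count adjacent strictly-opposite directions
--     d = list(num[:n]) if n > 0 else []
--     s = [(y > x) - (y < x) for x, y in zip(d, d[1:])]
--     return sum(1 for x, y in zip(s, s[1:]) if x * y == -1)
-- ===== Notes on version B (the rewrite author's own statement) =====
-- stated objective: alternative
-- what changed: B replaces the indexed triple-comparison loop by a two-phase decomposition (build a +1/0/-1 direction sequence over consecutive pairs of num[:n], then count adjacent strictly-opposite directions); Pre_ excludes n > len(num), where A dereferences past the end and raises IndexError, except the accidental corner n = len(num)+1 with equal last two digits where short-circuit evaluation lets A return without the out-of-range read (B agrees with A there anyway, as the cite shows).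
-- outside the precondition, e.g. on slopeOfNum([1, 1], 3): A returns 0, B returns 0; on slopeOfNum([1, 3, 2, 2], 5): A returns 1, B returns 1
import Mathlib
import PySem

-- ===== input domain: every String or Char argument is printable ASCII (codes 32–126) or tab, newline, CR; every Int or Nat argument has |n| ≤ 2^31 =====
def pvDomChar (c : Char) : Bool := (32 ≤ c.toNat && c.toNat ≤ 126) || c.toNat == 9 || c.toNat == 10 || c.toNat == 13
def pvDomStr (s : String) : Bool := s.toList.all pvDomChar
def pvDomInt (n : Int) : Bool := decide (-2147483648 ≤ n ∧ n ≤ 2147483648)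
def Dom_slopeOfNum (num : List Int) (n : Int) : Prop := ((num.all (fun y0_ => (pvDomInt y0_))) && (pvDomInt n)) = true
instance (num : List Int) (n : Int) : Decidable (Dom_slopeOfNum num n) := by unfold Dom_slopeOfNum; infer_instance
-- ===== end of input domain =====

-- B replaces A's indexed triple-comparison loop by a two-phase decomposition:
-- build the +1/0/-1 direction sequence of num[:n], then count adjacent opposite directions.
-- Same O(n) cost; the objective is an alternative decomposition, not speed.

-- ===== PORT A =====
def slopeOfNum (num : List Int) (n : Int) : Int :=
  -- slope = 0; for i in range(1, n-1): if num[i] > num[i-1] and num[i] > num[i+1]: slope += 1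
  --                                    elif num[i] < num[i-1] and num[i] < num[i+1]: slope += 1
  -- (pyGetD is exact under Pre_, which keeps every index in range)
  (PySem.List.pyRange 1 (n - 1) 1).foldl (fun slope i =>
    if PySem.List.pyGetD num i 0 > PySem.List.pyGetD num (i - 1) 0 ∧
       PySem.List.pyGetD num i 0 > PySem.List.pyGetD num (i + 1) 0 then slope + 1
    else if PySem.List.pyGetD num i 0 < PySem.List.pyGetD num (i - 1) 0 ∧
            PySem.List.pyGetD num i 0 < PySem.List.pyGetD num (i + 1) 0 then slope + 1
    else slope) 0

-- ===== PORT B =====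
def slopeOfNum_alt (num : List Int) (n : Int) : Int :=
  -- d = list(num[:n]) if n > 0 else []
  let d := if 0 < n then PySem.List.slice num none (some n) else []
  -- s = [(y > x) - (y < x) for x, y in zip(d, d[1:])]
  let s := (d.zip (PySem.List.slice d (some 1) none)).map
    (fun p => (if p.2 > p.1 then (1 : Int) else 0) - (if p.2 < p.1 then 1 else 0))
  -- return sum(1 for x, y in zip(s, s[1:]) if x * y == -1)
  ((s.zip (PySem.List.slice s (some 1) none)).countP (fun q => q.1 * q.2 == -1) : Int)

-- ===== PRECONDITION & SPEC =====
-- Pre_ excludes n > len(num): there A reads past the end and raises IndexError, except in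
-- the accidental corner n = len(num)+1 with equal last two digits, where short-circuiting
-- returns without the out-of-range read (B happens to agree with A there anyway).
def Pre_slopeOfNum (num : List Int) (n : Int) : Prop := n ≤ (num.length : Int) ∨ n ≤ 2
instance (num : List Int) (n : Int) : Decidable (Pre_slopeOfNum num n) := by
  unfold Pre_slopeOfNum; infer_instance

def pvWitness_slopeOfNum : List Int × Int := ([1, 3, 2, 2, 5], 5)

def Spec_slopeOfNum (num : List Int) (n : Int) (out : Int) : Prop := out = slopeOfNum_alt num n
instance (num : List Int) (n : Int) (out : Int) : Decidable (Spec_slopeOfNum num n out) := by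
  unfold Spec_slopeOfNum; infer_instance

-- ===== CLAIM (what is proved, stated in full; the proofs are below) =====
def Claim_equal_slopeOfNum : Prop := ∀ (num : List Int) (n : Int),
  Dom_slopeOfNum num n → Pre_slopeOfNum num n → Spec_slopeOfNum num n (slopeOfNum num n)

-- ===== LEMMAS AND PROOFS =====

-- A's loop body, named for the proofs (definitionally the lambda in the port)
def bodyA (d : List Int) (slope i : Int) : Int :=
  if PySem.List.pyGetD d i 0 > PySem.List.pyGetD d (i - 1) 0 ∧
     PySem.List.pyGetD d i 0 > PySem.List.pyGetD d (i + 1) 0 then slope + 1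
  else if PySem.List.pyGetD d i 0 < PySem.List.pyGetD d (i - 1) 0 ∧
          PySem.List.pyGetD d i 0 < PySem.List.pyGetD d (i + 1) 0 then slope + 1
  else slope

lemma slopeA_eq (num : List Int) (n : Int) :
    slopeOfNum num n = (PySem.List.pyRange 1 (n - 1) 1).foldl (bodyA num) 0 := rfl

-- A's local maximum/minimum indicator for the triple (a, b, c)
def locInd (a b c : Int) : Int :=
  if b > a ∧ b > c then 1 else if b < a ∧ b < c then 1 else 0

-- B's direction sign of a consecutive pair
def sgn (a b : Int) : Int := (if b > a then 1 else 0) - (if b < a then 1 else 0)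

-- the direction sequence of a list (what B's zip/map builds)
def dirs : List Int → List Int
  | a :: b :: t => sgn a b :: dirs (b :: t)
  | _ => []

-- count of adjacent opposite-direction pairs (what B's second zip/countP computes)
def cnt : List Int → Nat
  | x :: y :: t => (if x * y == -1 then 1 else 0) + cnt (y :: t)
  | _ => 0

-- A's loop, written as structural recursion over the list it scans
def countA : List Int → Int
  | a :: b :: c :: t => locInd a b c + countA (b :: c :: t)
  | _ => 0

lemma zip_tail_map_eq_dirs : ∀ d : List Int,
    (d.zip d.tail).map (fun p => (if p.2 > p.1 then (1 : Int) else 0) - (if p.2 < p.1 then 1 else 0))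
      = dirs d
  | [] => rfl
  | [_] => rfl
  | a :: b :: t => by
    have ih := zip_tail_map_eq_dirs (b :: t)
    simp only [List.tail_cons] at ih
    simp only [List.tail_cons, List.zip_cons_cons, List.map_cons, dirs, sgn]
    rw [ih]

lemma zip_tail_countP_eq_cnt : ∀ s : List Int,
    (s.zip s.tail).countP (fun q => q.1 * q.2 == -1) = cnt s
  | [] => rfl
  | [_] => rfl
  | x :: y :: t => by
    have ih := zip_tail_countP_eq_cnt (y :: t)
    simp only [List.tail_cons] at ih
    simp only [List.tail_cons, List.zip_cons_cons, List.countP_cons, cnt]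
    omega

lemma locInd_eq_sgn_pair (a b c : Int) :
    locInd a b c = if sgn a b * sgn b c == -1 then 1 else 0 := by
  unfold locInd sgn
  split_ifs <;> simp_all <;> omega

lemma countA_eq_cnt_dirs : ∀ d : List Int, countA d = (cnt (dirs d) : Int)
  | [] => rfl
  | [_] => rfl
  | [_, _] => rfl
  | a :: b :: c :: t => by
    have ih := countA_eq_cnt_dirs (b :: c :: t)
    simp only [countA, dirs, cnt] at ih ⊢
    rw [locInd_eq_sgn_pair, ih]
    split <;> push_cast <;> ring

lemma cnt_dirs_short (d : List Int) (h : d.length ≤ 2) : cnt (dirs d) = 0 := by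
  match d with
  | [] => rfl
  | [_] => rfl
  | [_, _] => rfl
  | _ :: _ :: _ :: _ => simp at h

lemma pyGetD_cons_shift (x : Int) (tl : List Int) (j : Int) (hj : 0 ≤ j) :
    PySem.List.pyGetD (x :: tl) (j + 1) 0 = PySem.List.pyGetD tl j 0 := by
  have h : j = ((j.toNat : Nat) : Int) := by omega
  rw [h, show ((j.toNat : Nat) : Int) + 1 = ((j.toNat + 1 : Nat) : Int) by push_cast; ring,
      PySem.List.pyGetD_natCast, PySem.List.pyGetD_natCast, List.getD_cons_succ]

-- A's body at index i+1 on x :: tl is its body at index i on tl (1 ≤ i)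
lemma bodyA_shift (x : Int) (tl : List Int) (acc i : Int) (hi : 1 ≤ i) :
    bodyA (x :: tl) acc (i + 1) = bodyA tl acc i := by
  unfold bodyA
  rw [show i + 1 - 1 = (i - 1) + 1 by ring,
      pyGetD_cons_shift x tl i (by omega), pyGetD_cons_shift x tl (i - 1) (by omega),
      pyGetD_cons_shift x tl (i + 1) (by omega)]

lemma shift_range (m : Nat) :
    PySem.List.pyRange 2 ((m : Int) + 2) 1 = (PySem.List.pyRange 1 ((m : Int) + 1) 1).map (fun i => i + 1) := by
  rw [PySem.List.pyRange_one, PySem.List.pyRange_one, List.map_map]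
  rw [show (((m : Int) + 2) - 2).toNat = m by omega, show (((m : Int) + 1) - 1).toNat = m by omega]
  apply List.map_congr_left
  intro a _
  simp [Function.comp]
  ring

-- A's loop over range(1, len(d)-1) computes countA d
lemma loopA : ∀ (d : List Int) (acc : Int),
    (PySem.List.pyRange 1 ((d.length : Int) - 1) 1).foldl (bodyA d) acc = acc + countA d
  | [], acc => by
    rw [PySem.List.pyRange_one_eq_nil (by norm_num)]; simp [countA]
  | [a], acc => by
    rw [PySem.List.pyRange_one_eq_nil (by norm_num)]; simp [countA]
  | [a, b], acc => by
    rw [PySem.List.pyRange_one_eq_nil (by norm_num)]; simp [countA]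
  | a :: b :: c :: t, acc => by
    have hlen : ((a :: b :: c :: t).length : Int) - 1 = (t.length : Int) + 2 := by
      simp only [List.length_cons]; push_cast; ring
    rw [hlen, PySem.List.pyRange_one_cons (by omega)]
    simp only [List.foldl_cons]
    have hfirst : bodyA (a :: b :: c :: t) acc 1 = acc + locInd a b c := by
      have e0 : PySem.List.pyGetD (a :: b :: c :: t) ((1 : Int) - 1) 0 = a := by
        rw [show ((1 : Int) - 1) = ((0 : Nat) : Int) by norm_num, PySem.List.pyGetD_natCast]; rfl
      have e1 : PySem.List.pyGetD (a :: b :: c :: t) (1 : Int) 0 = b := by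
        rw [show (1 : Int) = ((1 : Nat) : Int) by norm_num, PySem.List.pyGetD_natCast]; rfl
      have e2 : PySem.List.pyGetD (a :: b :: c :: t) ((1 : Int) + 1) 0 = c := by
        rw [show ((1 : Int) + 1) = ((2 : Nat) : Int) by norm_num, PySem.List.pyGetD_natCast]; rfl
      unfold bodyA locInd
      rw [e0, e1, e2]
      split_ifs <;> omega
    rw [hfirst, show (1 : Int) + 1 = 2 by norm_num, shift_range t.length, List.foldl_map]
    have hcong : ∀ (acc2 : Int), ∀ i ∈ PySem.List.pyRange 1 ((t.length : Int) + 1) 1,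
        bodyA (a :: b :: c :: t) acc2 (i + 1) = bodyA (b :: c :: t) acc2 i := by
      intro acc2 i hi
      exact bodyA_shift a (b :: c :: t) acc2 i (PySem.List.mem_pyRange_one.mp hi).1
    rw [PySem.List.foldl_congr_mem _ _ _ _ hcong]
    have ih := loopA (b :: c :: t) (acc + locInd a b c)
    rw [show (((b :: c :: t).length : Int) - 1) = (t.length : Int) + 1 by
          simp only [List.length_cons]; push_cast; ring] at ih
    rw [ih]
    simp only [countA]
    ring

-- pyGetD agrees on a list and its prefix, for indices inside the prefix
lemma pyGetD_take (xs : List Int) (m : Nat) (j : Int)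
    (hj0 : 0 ≤ j) (hjm : j < (m : Int)) (hm : m ≤ xs.length) :
    PySem.List.pyGetD (xs.take m) j 0 = PySem.List.pyGetD xs j 0 := by
  have hlt : (xs.take m).length = m := by simp [List.length_take]; omega
  rw [PySem.List.pyGetD_eq_getElem (xs.take m) 0 hj0 (by rw [hlt]; exact_mod_cast hjm),
      PySem.List.pyGetD_eq_getElem xs 0 hj0 (by omega)]
  exact List.getElem_take

-- ===== VERDICT (by name: the statement is the Claim_ definition above) =====
theorem slopeOfNum_spec : Claim_equal_slopeOfNum := by
  intro num n hdom hpre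
  unfold Spec_slopeOfNum
  rw [slopeA_eq]
  unfold slopeOfNum_alt
  by_cases hn0 : 0 < n
  · simp only [if_pos hn0]
    rw [PySem.List.slice_to _ (by omega), PySem.List.slice_from_one, zip_tail_map_eq_dirs,
        PySem.List.slice_from_one, zip_tail_countP_eq_cnt]
    by_cases hn2 : n ≤ 2
    · rw [PySem.List.pyRange_one_eq_nil (by omega)]
      simp only [List.foldl_nil]
      rw [cnt_dirs_short _ (by simp [List.length_take]; omega)]
      simp
    · -- 3 ≤ n, so Pre_ forces n ≤ len num and every index the loop touches is in range
      have hnl : n ≤ (num.length : Int) := by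
        rcases hpre with h | h
        · exact h
        · omega
      have hcong : ∀ (acc : Int), ∀ i ∈ PySem.List.pyRange 1 (n - 1) 1,
          bodyA num acc i = bodyA (num.take n.toNat) acc i := by
        intro acc i hi
        rw [PySem.List.mem_pyRange_one] at hi
        unfold bodyA
        rw [← pyGetD_take num n.toNat i (by omega) (by omega) (by omega),
            ← pyGetD_take num n.toNat (i - 1) (by omega) (by omega) (by omega),
            ← pyGetD_take num n.toNat (i + 1) (by omega) (by omega) (by omega)]
      rw [PySem.List.foldl_congr_mem _ _ _ _ hcong]
      have htl : (num.take n.toNat).length = n.toNat := by simp [List.length_take]; omega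
      rw [show n - 1 = (((num.take n.toNat).length : Int)) - 1 by rw [htl]; omega,
          loopA (num.take n.toNat) 0, countA_eq_cnt_dirs]
      norm_num
  · -- n ≤ 0: empty loop, and B's prefix is empty
    simp only [if_neg hn0]
    rw [PySem.List.pyRange_one_eq_nil (by omega)]
    simp [PySem.List.slice_from_one]
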